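-- pv_equiv track=rewrite | github.com/hmomin/networkgym | NetworkAgent/discrete_action_util.py | convert_user_increment_to_discrete_increment_action
-- ===== SOURCE A (Python) =====
-- def convert_user_increment_to_discrete_increment_action(
--     user_increment: list[int],
-- ) -> int:
--     num_users = len(user_increment)
--     user_discretized_actions = [int(round(x + 1)) for x in user_increment]
--     discrete_action = 0
--     for idx, user_action in enumerate(user_discretized_actions):
--         power = num_users - (idx + 1)
--         discrete_action += user_action * (3**power)
--     return discrete_action
-- ===== SOURCE B (Python) =====
-- def convert_user_increment_to_discrete_increment_action(
--     user_increment: list[int],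
-- ) -> int:
--     discrete_action = 0
--     for x in user_increment:
--         discrete_action = discrete_action * 3 + (x + 1)
--     return discrete_action
-- ===== Notes on version B (the rewrite author's own statement) =====
-- stated objective: faster
-- what changed: Replaces the per-index power computation 3**(n-1-idx) (big-number pow in every iteration) with Horner's method, a single accumulator d = d*3 + (x+1) over one pass.
import Mathlib
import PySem

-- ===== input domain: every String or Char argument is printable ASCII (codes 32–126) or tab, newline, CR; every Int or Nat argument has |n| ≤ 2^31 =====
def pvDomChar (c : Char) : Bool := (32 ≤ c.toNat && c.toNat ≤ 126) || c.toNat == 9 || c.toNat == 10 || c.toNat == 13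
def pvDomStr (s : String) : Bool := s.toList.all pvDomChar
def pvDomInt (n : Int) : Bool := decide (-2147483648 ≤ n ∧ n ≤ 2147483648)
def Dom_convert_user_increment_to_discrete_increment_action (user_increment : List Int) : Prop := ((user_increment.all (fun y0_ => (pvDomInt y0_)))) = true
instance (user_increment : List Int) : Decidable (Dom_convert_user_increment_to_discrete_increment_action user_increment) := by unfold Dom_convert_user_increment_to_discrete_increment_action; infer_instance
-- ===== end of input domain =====

-- B replaces A's per-index power 3**(n-1-idx) with a one-pass Horner accumulator (objective: faster).
-- ===== PORT A =====
-- A's for-loop over enumerate(user_discretized_actions), carrying idx and the accumulator.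
def pvALoop (num_users : Nat) (idx : Nat) (acc : Int) : List Int → Int
  | [] => acc
  | user_action :: rest =>
      pvALoop num_users (idx + 1) (acc + user_action * 3 ^ (num_users - (idx + 1))) rest

def convert_user_increment_to_discrete_increment_action (user_increment : List Int) : Int :=
  let num_users := user_increment.length
  let user_discretized_actions := user_increment.map (fun x => x + 1)  -- int(round(x + 1)) = x + 1 for int x
  pvALoop num_users 0 0 user_discretized_actions

-- ===== PORT B =====
def convert_user_increment_to_discrete_increment_action_alt (user_increment : List Int) : Int :=
  user_increment.foldl (fun discrete_action x => discrete_action * 3 + (x + 1)) 0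

-- ===== PRECONDITION & SPEC =====
def Spec_convert_user_increment_to_discrete_increment_action (user_increment : List Int) (out : Int) : Prop := out = convert_user_increment_to_discrete_increment_action_alt user_increment
instance (user_increment : List Int) (out : Int) : Decidable (Spec_convert_user_increment_to_discrete_increment_action user_increment out) := by unfold Spec_convert_user_increment_to_discrete_increment_action; infer_instance

-- ===== CLAIM (what is proved, stated in full; the proofs are below) =====
def Claim_equal_convert_user_increment_to_discrete_increment_action : Prop := ∀ (user_increment : List Int), Dom_convert_user_increment_to_discrete_increment_action user_increment → Spec_convert_user_increment_to_discrete_increment_action user_increment (convert_user_increment_to_discrete_increment_action user_increment)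

-- ===== LEMMAS AND PROOFS =====
-- Horner with a nonzero seed factors the seed out.
theorem pvHorner_seed (ys : List Int) (d : Int) :
    ys.foldl (fun a x => a * 3 + x) d = d * 3 ^ ys.length + ys.foldl (fun a x => a * 3 + x) 0 := by
  induction ys generalizing d with
  | nil => simp
  | cons y ys ih =>
      simp only [List.foldl_cons, List.length_cons]
      rw [ih (d * 3 + y), ih (0 * 3 + y)]
      ring

-- A's loop, when the invariant num_users = idx + ys.length holds, computes acc + Horner(ys).
theorem pvALoop_eq (ys : List Int) (idx : Nat) (acc : Int) :
    pvALoop (idx + ys.length) idx acc ys = acc + ys.foldl (fun a x => a * 3 + x) 0 := by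
  induction ys generalizing idx acc with
  | nil => simp [pvALoop]
  | cons y ys ih =>
      simp only [pvALoop, List.length_cons]
      have h : idx + (ys.length + 1) = (idx + 1) + ys.length := by omega
      rw [h, ih (idx + 1)]
      have h2 : (idx + 1) + ys.length - (idx + 1) = ys.length := by omega
      rw [h2, List.foldl_cons, pvHorner_seed ys (0 * 3 + y)]
      ring


-- ===== VERDICT (by name: the statement is the Claim_ definition above) =====
theorem convert_user_increment_to_discrete_increment_action_spec : Claim_equal_convert_user_increment_to_discrete_increment_action := by
  intro u _
  unfold Spec_convert_user_increment_to_discrete_increment_action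
  unfold convert_user_increment_to_discrete_increment_action
    convert_user_increment_to_discrete_increment_action_alt
  simp only []
  have hlen : u.length = 0 + (u.map (fun x => x + 1)).length := by simp
  rw [hlen, pvALoop_eq, List.foldl_map]
  simp
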